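-- pv_equiv track=rewrite | github.com/satyammistari/Implement-Research-Papers-into-from-scratch | flash attention/block_sparse.py | butterfly_mask
-- ===== SOURCE A (Python) =====
-- import math, sys, random
--
-- def butterfly_mask(N, Br, Bc):
--
--     Tr, Tc = math.ceil(N/Br), math.ceil(N/Bc)
--     mask = [[0]*Tc for _ in range(Tr)]
--     for i in range(min(Tr, Tc)):
--         mask[i][i] = 1
--     stride = 1
--     while stride < max(Tr, Tc):
--         for i in range(Tr):
--             j = i ^ stride
--             if 0 <= j < Tc:
--                 mask[i][j] = 1
--         stride <<= 1
--     return mask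
-- ===== SOURCE B (Python) =====
-- import math
--
-- def butterfly_mask(N, Br, Bc):
--     Tr, Tc = math.ceil(N/Br), math.ceil(N/Bc)
--     big = max(Tr, Tc)
--     return [[1 if (i ^ j) == 0 or ((i ^ j) & ((i ^ j) - 1)) == 0 and (i ^ j) < big else 0
--              for j in range(Tc)]
--             for i in range(Tr)]
-- ===== Notes on version B (the rewrite author's own statement) =====
-- stated objective: alternative
-- what changed: A mutates a zero matrix with a diagonal pass plus log-many whole-matrix stride passes (stride doubling, XOR flips); B never mutates or enumerates strides: it builds the matrix by a nested comprehension deciding each cell independently with the bitwise predicate 'v = i^j is 0 or a power of two (v & (v-1) == 0) below max(Tr, Tc)'.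
-- outside the precondition, e.g. on butterfly_mask(8, 0, 2): A raises ZeroDivisionError, B raises ZeroDivisionError
import Mathlib
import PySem

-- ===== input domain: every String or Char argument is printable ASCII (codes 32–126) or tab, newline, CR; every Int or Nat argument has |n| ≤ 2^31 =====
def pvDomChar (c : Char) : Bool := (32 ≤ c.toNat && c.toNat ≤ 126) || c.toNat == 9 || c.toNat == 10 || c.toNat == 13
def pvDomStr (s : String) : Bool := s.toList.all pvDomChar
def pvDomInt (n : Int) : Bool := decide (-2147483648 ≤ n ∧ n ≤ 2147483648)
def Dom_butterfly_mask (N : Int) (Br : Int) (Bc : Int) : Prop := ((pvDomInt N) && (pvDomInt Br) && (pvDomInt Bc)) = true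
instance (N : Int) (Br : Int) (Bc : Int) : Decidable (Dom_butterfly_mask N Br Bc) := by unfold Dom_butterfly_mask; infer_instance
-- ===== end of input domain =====

-- B replaces A's diagonal pass + log-many mutating stride passes by a nested comprehension
-- deciding each cell independently with the bit trick 'i^j is 0 or a power of two < max(Tr,Tc)'
-- (objective: alternative).

-- ===== PORT A =====

-- math.ceil(a/b); exact for |a| ≤ 2^31 (float quotient rounds to the correct ceiling there)
def pyCeil (a b : Int) : Int := -(PySem.Int.floordiv (-a) b)

-- mask[i][j] = 1 (indices produced in range by A's code)
def setCell (m : List (List Int)) (i j : Int) : List (List Int) :=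
  PySem.List.pySetD m i (PySem.List.pySetD (PySem.List.pyGetD m i []) j (1 : Int))

-- one pass of 'for i in range(Tr): j = i ^ stride; if 0 <= j < Tc: mask[i][j] = 1'
def stridePass (Tr Tc stride : Int) (m : List (List Int)) : List (List Int) :=
  (PySem.List.pyRange 0 Tr 1).foldl
    (fun m i =>
      if 0 ≤ PySem.Int.bxor i stride ∧ PySem.Int.bxor i stride < Tc
        then setCell m i (PySem.Int.bxor i stride) else m) m

-- 'while stride < max(Tr, Tc): … ; stride <<= 1'; the 0 < stride conjunct is a totality
-- guard only (A always calls it with stride ≥ 1, where it is vacuous)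
def strideLoop (Tr Tc : Int) (m : List (List Int)) (stride : Int) : List (List Int) :=
  if h : 0 < stride ∧ stride < max Tr Tc then
    strideLoop Tr Tc (stridePass Tr Tc stride m) (stride * 2)
  else m
termination_by (max Tr Tc - stride).toNat
decreasing_by omega

def butterfly_mask (N : Int) (Br : Int) (Bc : Int) : List (List Int) :=
  let Tr := pyCeil N Br
  let Tc := pyCeil N Bc
  let mask := List.replicate Tr.toNat (List.replicate Tc.toNat (0 : Int))
  let mask := (PySem.List.pyRange 0 (min Tr Tc) 1).foldl (fun m i => setCell m i i) mask
  strideLoop Tr Tc mask 1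

-- ===== PORT B =====

-- one cell of B's comprehension: '1 if (i^j)==0 or ((i^j)&((i^j)-1))==0 and (i^j)<big else 0'
def pvCell (big i j : Int) : Int :=
  if PySem.Int.bxor i j = 0 ∨
      (PySem.Int.band (PySem.Int.bxor i j) (PySem.Int.bxor i j - 1) = 0 ∧
        PySem.Int.bxor i j < big)
    then 1 else 0

def butterfly_mask_alt (N : Int) (Br : Int) (Bc : Int) : List (List Int) :=
  let Tr := pyCeil N Br
  let Tc := pyCeil N Bc
  let big := max Tr Tc
  (PySem.List.pyRange 0 Tr 1).map (fun i => (PySem.List.pyRange 0 Tc 1).map (pvCell big i))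

-- ===== PRECONDITION & SPEC =====
-- Pre_ excludes exactly Br = 0 or Bc = 0, where Python's N/Br (resp. N/Bc) raises ZeroDivisionError.
def Pre_butterfly_mask (N : Int) (Br : Int) (Bc : Int) : Prop := Br ≠ 0 ∧ Bc ≠ 0
instance (N : Int) (Br : Int) (Bc : Int) : Decidable (Pre_butterfly_mask N Br Bc) := by
  unfold Pre_butterfly_mask; infer_instance

def pvWitness_butterfly_mask : Int × Int × Int := (8, 2, 2)

def Spec_butterfly_mask (N : Int) (Br : Int) (Bc : Int) (out : List (List Int)) : Prop := out = butterfly_mask_alt N Br Bc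
instance (N : Int) (Br : Int) (Bc : Int) (out : List (List Int)) : Decidable (Spec_butterfly_mask N Br Bc out) := by unfold Spec_butterfly_mask; infer_instance

-- ===== CLAIM (what is proved, stated in full; the proofs are below) =====
def Claim_equal_butterfly_mask : Prop := ∀ (N : Int) (Br : Int) (Bc : Int), Dom_butterfly_mask N Br Bc → Pre_butterfly_mask N Br Bc → Spec_butterfly_mask N Br Bc (butterfly_mask N Br Bc)

-- ===== LEMMAS AND PROOFS =====

-- proof-only helpers: entry access and a shape invariant for the mutated matrix
def entry (m : List (List Int)) (a b : Nat) : Int := (m.getD a []).getD b 0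

def Shaped (m : List (List Int)) (R C : Nat) : Prop :=
  m.length = R ∧ ∀ r ∈ m, r.length = C

theorem setCell_natCast (m : List (List Int)) (i j : Nat) :
    setCell m (↑i) (↑j) = m.set i ((m.getD i []).set j 1) := by
  simp [setCell]

theorem getD_set_ne {α : Type} (l : List α) (i a : Nat) (r : α) (d : α) (h : a ≠ i) :
    (l.set i r).getD a d = l.getD a d := by
  simp only [List.getD_eq_getElem?_getD]
  rw [List.getElem?_set_ne (fun hh => h hh.symm)]

theorem getD_set_self {α : Type} (l : List α) (i : Nat) (r : α) (d : α) (h : i < l.length) :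
    (l.set i r).getD i d = r := by
  simp only [List.getD_eq_getElem?_getD]
  rw [List.getElem?_set_self h]
  rfl

theorem shaped_setCell {m : List (List Int)} {R C : Nat} (hm : Shaped m R C) (i j : Nat) :
    Shaped (setCell m (↑i) (↑j)) R C := by
  obtain ⟨hlen, hrows⟩ := hm
  rw [setCell_natCast]
  by_cases hi : i < m.length
  · refine ⟨by simpa using hlen, ?_⟩
    intro r hr
    rcases List.mem_or_eq_of_mem_set hr with h | h
    · exact hrows r h
    · subst h
      rw [List.length_set, List.getD_eq_getElem m [] hi]
      exact hrows _ (List.getElem_mem hi)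
  · rw [List.set_eq_of_length_le (by omega)]
    exact ⟨hlen, hrows⟩

theorem entry_setCell (m : List (List Int)) (i j a b : Nat)
    (hi : i < m.length) (hj : j < (m.getD i []).length) :
    entry (setCell m (↑i) (↑j)) a b = if a = i ∧ b = j then (1 : Int) else entry m a b := by
  rw [setCell_natCast]
  unfold entry
  by_cases hai : a = i
  · subst hai
    rw [getD_set_self _ _ _ _ hi]
    by_cases hbj : b = j
    · subst hbj
      rw [getD_set_self _ _ _ _ hj]
      simp
    · rw [getD_set_ne _ _ _ _ _ hbj]
      simp [hbj]
  · rw [getD_set_ne _ _ _ _ _ hai]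
    simp [hai]

theorem entry_replicate (R C a b : Nat) :
    entry (List.replicate R (List.replicate C (0 : Int))) a b = 0 := by
  unfold entry
  have h1 : (List.replicate R (List.replicate C (0 : Int))).getD a []
      = if a < R then List.replicate C (0 : Int) else [] := by
    simp only [List.getD_eq_getElem?_getD, List.getElem?_replicate]
    split_ifs <;> rfl
  rw [h1]
  split_ifs
  · simp only [List.getD_eq_getElem?_getD, List.getElem?_replicate]
    split_ifs <;> rfl
  · rfl

-- the diagonal pass: entries become 1 exactly on the visited diagonal cells
theorem entry_diagFold (l : List Int) :
    ∀ (m : List (List Int)) (R C : Nat), Shaped m R C →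
    (∀ x ∈ l, 0 ≤ x ∧ x.toNat < R ∧ x.toNat < C) →
    Shaped (l.foldl (fun m i => setCell m i i) m) R C ∧
    ∀ a b : Nat, entry (l.foldl (fun m i => setCell m i i) m) a b =
      if ((a : Int) ∈ l ∧ a = b) then 1 else entry m a b := by
  induction l with
  | nil =>
    intro m R C hm _
    exact ⟨hm, fun a b => by simp⟩
  | cons x l ih =>
    intro m R C hm hl
    obtain ⟨hx0, hxR, hxC⟩ := hl x (List.mem_cons_self ..)
    have hxcast : ((x.toNat : Nat) : Int) = x := Int.toNat_of_nonneg hx0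
    have hmlen : m.length = R := hm.1
    have hrowlen : (m.getD x.toNat []).length = C := by
      rw [List.getD_eq_getElem m [] (by omega)]
      exact hm.2 _ (List.getElem_mem (by omega))
    have hstep' : setCell m x x = setCell m (↑x.toNat) (↑x.toNat) := by rw [hxcast]
    have hm' : Shaped (setCell m (↑x.toNat) (↑x.toNat)) R C := shaped_setCell hm _ _
    obtain ⟨hs, he⟩ := ih _ R C hm' (fun y hy => hl y (List.mem_cons_of_mem _ hy))
    constructor
    · rw [List.foldl_cons, hstep']
      exact hs
    · intro a b
      rw [List.foldl_cons, hstep', he a b,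
        entry_setCell m x.toNat x.toNat a b (by omega) (by rw [hrowlen]; omega)]
      by_cases h2 : a = b
      · subst h2
        by_cases h3 : a = x.toNat
        · have hA : ((a : Nat) : Int) = x := by omega
          have hmem : ((a : Nat) : Int) ∈ x :: l := by
            rw [List.mem_cons]; exact Or.inl hA
          by_cases hml : ((a : Nat) : Int) ∈ l
          · rw [if_pos ⟨hml, rfl⟩, if_pos ⟨hmem, rfl⟩]
          · rw [if_neg (fun hc => hml hc.1), if_pos ⟨h3, h3⟩, if_pos ⟨hmem, rfl⟩]
        · have hA : ¬((a : Nat) : Int) = x := by omega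
          have hno : ¬(a = x.toNat ∧ a = x.toNat) := fun ⟨p, _⟩ => h3 p
          rw [if_neg hno]
          simp [List.mem_cons, hA]
      · have hno : ¬(a = x.toNat ∧ b = x.toNat) := fun ⟨p, q⟩ => h2 (p.trans q.symm)
        simp [h2, hno]

-- one iteration of the inner stride loop, seen entrywise
theorem entry_strideStep (Tc s : Int) (m : List (List Int)) (R C : Nat)
    (hm : Shaped m R C) (hC : C = Tc.toNat)
    (x : Int) (hx0 : 0 ≤ x) (hxR : x.toNat < R) (a b : Nat) (hb : b < C) :
    entry (if 0 ≤ PySem.Int.bxor x s ∧ PySem.Int.bxor x s < Tc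
            then setCell m x (PySem.Int.bxor x s) else m) a b
      = if ((a : Int) = x ∧ (b : Int) = PySem.Int.bxor (↑a) s) then 1 else entry m a b := by
  have hmlen : m.length = R := hm.1
  have hrowlen : (m.getD x.toNat []).length = C := by
    rw [List.getD_eq_getElem m [] (by omega)]
    exact hm.2 _ (List.getElem_mem (by omega))
  have hxcast : ((x.toNat : Nat) : Int) = x := Int.toNat_of_nonneg hx0
  by_cases hAB : ((a : Int) = x ∧ (b : Int) = PySem.Int.bxor (↑a) s)
  · obtain ⟨hA, hB⟩ := hAB
    have hBx : (b : Int) = PySem.Int.bxor x s := by rw [← hA]; exact hB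
    have h0 : 0 ≤ PySem.Int.bxor x s := by rw [← hBx]; exact Int.natCast_nonneg b
    have h1 : PySem.Int.bxor x s < Tc := by rw [← hBx]; omega
    rw [if_pos ⟨h0, h1⟩,
      show setCell m x (PySem.Int.bxor x s)
          = setCell m (↑x.toNat) (↑(PySem.Int.bxor x s).toNat) by
        rw [hxcast, Int.toNat_of_nonneg h0],
      entry_setCell m x.toNat (PySem.Int.bxor x s).toNat a b (by rw [hmlen]; omega)
        (by rw [hrowlen]; omega)]
    rw [if_pos ⟨by omega, by omega⟩, if_pos ⟨hA, hB⟩]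
  · rw [if_neg hAB]
    split_ifs with hcond
    · rw [show setCell m x (PySem.Int.bxor x s)
            = setCell m (↑x.toNat) (↑(PySem.Int.bxor x s).toNat) by
          rw [hxcast, Int.toNat_of_nonneg hcond.1],
        entry_setCell m x.toNat (PySem.Int.bxor x s).toNat a b (by rw [hmlen]; omega)
          (by rw [hrowlen]; omega)]
      have hno : ¬(a = x.toNat ∧ b = (PySem.Int.bxor x s).toNat) := by
        rintro ⟨hp, hq⟩
        have hax : (a : Int) = x := by omega
        exact hAB ⟨hax, by rw [hax]; omega⟩
      rw [if_neg hno]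
    · rfl

-- the whole inner loop 'for i in range(Tr)'
theorem entry_strideFold (Tc s : Int) (l : List Int) :
    ∀ (m : List (List Int)) (R C : Nat), Shaped m R C → C = Tc.toNat →
    (∀ x ∈ l, 0 ≤ x ∧ x.toNat < R) →
    Shaped (l.foldl (fun m i =>
      if 0 ≤ PySem.Int.bxor i s ∧ PySem.Int.bxor i s < Tc
        then setCell m i (PySem.Int.bxor i s) else m) m) R C ∧
    ∀ a b : Nat, b < C →
      entry (l.foldl (fun m i =>
        if 0 ≤ PySem.Int.bxor i s ∧ PySem.Int.bxor i s < Tc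
          then setCell m i (PySem.Int.bxor i s) else m) m) a b
        = if ((a : Int) ∈ l ∧ (b : Int) = PySem.Int.bxor (↑a) s) then 1 else entry m a b := by
  induction l with
  | nil =>
    intro m R C hm _ _
    exact ⟨hm, fun a b _ => by simp⟩
  | cons x l ih =>
    intro m R C hm hC hl
    obtain ⟨hx0, hxR⟩ := hl x (List.mem_cons_self ..)
    have hxcast : ((x.toNat : Nat) : Int) = x := Int.toNat_of_nonneg hx0
    have hm' : Shaped (if 0 ≤ PySem.Int.bxor x s ∧ PySem.Int.bxor x s < Tc
        then setCell m x (PySem.Int.bxor x s) else m) R C := by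
      split_ifs with hcond
      · rw [show setCell m x (PySem.Int.bxor x s)
              = setCell m (↑x.toNat) (↑(PySem.Int.bxor x s).toNat) by
            rw [hxcast, Int.toNat_of_nonneg hcond.1]]
        exact shaped_setCell hm _ _
      · exact hm
    obtain ⟨hs, he⟩ := ih _ R C hm' hC (fun y hy => hl y (List.mem_cons_of_mem _ hy))
    refine ⟨by simpa using hs, ?_⟩
    intro a b hb
    rw [List.foldl_cons, he a b hb, entry_strideStep Tc s m R C hm hC x hx0 hxR a b hb]
    by_cases hB : (b : Int) = PySem.Int.bxor (↑a) s
    · by_cases hM : (a : Int) ∈ l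
      · simp [hM, hB, List.mem_cons]
      · by_cases hA : (a : Int) = x
        · simp [hB, hA, List.mem_cons]
        · simp [hB, hA, List.mem_cons]
    · simp [hB]

theorem shaped_stridePass (Tr Tc s : Int) (m : List (List Int))
    (hm : Shaped m Tr.toNat Tc.toNat) :
    Shaped (stridePass Tr Tc s m) Tr.toNat Tc.toNat := by
  unfold stridePass
  exact (entry_strideFold Tc s (PySem.List.pyRange 0 Tr 1) m _ _ hm rfl
    (fun x hx => by
      rw [PySem.List.mem_pyRange_one] at hx
      exact ⟨hx.1, by omega⟩)).1

theorem entry_stridePass (Tr Tc s : Int) (m : List (List Int))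
    (hm : Shaped m Tr.toNat Tc.toNat) (a b : Nat) (ha : a < Tr.toNat) (hb : b < Tc.toNat) :
    entry (stridePass Tr Tc s m) a b
      = if ((b : Int) = PySem.Int.bxor (↑a) s) then 1 else entry m a b := by
  unfold stridePass
  rw [(entry_strideFold Tc s (PySem.List.pyRange 0 Tr 1) m _ _ hm rfl
    (fun x hx => by
      rw [PySem.List.mem_pyRange_one] at hx
      exact ⟨hx.1, by omega⟩)).2 a b hb]
  have hmem : (a : Int) ∈ PySem.List.pyRange 0 Tr 1 := by
    rw [PySem.List.mem_pyRange_one]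
    constructor <;> omega
  simp [hmem]

theorem strideLoop_props (Tr Tc : Int) :
    ∀ (n : Nat) (s : Int) (m : List (List Int)), (max Tr Tc - s).toNat = n → 0 < s →
    Shaped m Tr.toNat Tc.toNat →
    Shaped (strideLoop Tr Tc m s) Tr.toNat Tc.toNat ∧
    ∀ a b : Nat, a < Tr.toNat → b < Tc.toNat →
      ((∃ k : Nat, (b : Int) = PySem.Int.bxor (↑a) (s * 2 ^ k) ∧ s * 2 ^ k < max Tr Tc) →
        entry (strideLoop Tr Tc m s) a b = 1) ∧
      (¬(∃ k : Nat, (b : Int) = PySem.Int.bxor (↑a) (s * 2 ^ k) ∧ s * 2 ^ k < max Tr Tc) →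
        entry (strideLoop Tr Tc m s) a b = entry m a b) := by
  intro n
  induction n using Nat.strong_induction_on with
  | _ n IH =>
    intro s m hn hs hm
    rw [strideLoop]
    by_cases hcond : 0 < s ∧ s < max Tr Tc
    · rw [dif_pos hcond]
      have hmeas : (max Tr Tc - s * 2).toNat < n := by omega
      obtain ⟨sh2, he2⟩ := IH _ hmeas (s * 2) (stridePass Tr Tc s m) rfl (by omega)
        (shaped_stridePass Tr Tc s m hm)
      refine ⟨sh2, ?_⟩
      intro a b ha hb
      constructor
      · rintro ⟨k, hk1, hk2⟩
        cases k with
        | zero =>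
          by_cases hex2 : ∃ k : Nat, (b : Int) = PySem.Int.bxor (↑a) (s * 2 * 2 ^ k)
              ∧ s * 2 * 2 ^ k < max Tr Tc
          · exact (he2 a b ha hb).1 hex2
          · rw [(he2 a b ha hb).2 hex2, entry_stridePass Tr Tc s m hm a b ha hb,
              if_pos (by simpa using hk1)]
        | succ k =>
          refine (he2 a b ha hb).1 ⟨k, ?_, ?_⟩
          · rw [show s * 2 * 2 ^ k = s * 2 ^ (k + 1) by ring]; exact hk1
          · rw [show s * 2 * 2 ^ k = s * 2 ^ (k + 1) by ring]; exact hk2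
      · intro hex
        have hex2 : ¬∃ k : Nat, (b : Int) = PySem.Int.bxor (↑a) (s * 2 * 2 ^ k)
            ∧ s * 2 * 2 ^ k < max Tr Tc := by
          rintro ⟨k, hk1, hk2⟩
          exact hex ⟨k + 1, by rw [show s * 2 ^ (k + 1) = s * 2 * 2 ^ k by ring]; exact hk1,
            by rw [show s * 2 ^ (k + 1) = s * 2 * 2 ^ k by ring]; exact hk2⟩
        have hB : ¬((b : Int) = PySem.Int.bxor (↑a) s) := by
          intro hB
          exact hex ⟨0, by simpa using hB, by simpa using hcond.2⟩
        rw [(he2 a b ha hb).2 hex2, entry_stridePass Tr Tc s m hm a b ha hb, if_neg hB]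
    · rw [dif_neg hcond]
      refine ⟨hm, ?_⟩
      intro a b ha hb
      have hfalse : ¬∃ k : Nat, (b : Int) = PySem.Int.bxor (↑a) (s * 2 ^ k)
          ∧ s * 2 ^ k < max Tr Tc := by
        rintro ⟨k, -, h2⟩
        have hp : (0 : Int) < 2 ^ k := pow_pos (by norm_num) k
        have hle : s ≤ s * 2 ^ k := le_mul_of_one_le_right hs.le (by omega)
        have : max Tr Tc ≤ s := by
          by_contra hlt
          exact hcond ⟨hs, by omega⟩
        omega
      exact ⟨fun h => absurd h hfalse, fun _ => rfl⟩

theorem getElem_eq_entry (m : List (List Int)) (a b : Nat) (h1 : a < m.length)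
    (h2 : b < (m[a]'h1).length) : (m[a]'h1)[b]'h2 = entry m a b := by
  unfold entry
  rw [List.getD_eq_getElem _ _ h1, List.getD_eq_getElem _ _ h2]

-- n & (n-1) == 0 characterises the powers of two among the positive naturals
theorem land_pred_pow2 : ∀ n : Nat, n ≠ 0 → n &&& (n - 1) = 0 → ∃ k : Nat, n = 2 ^ k := by
  intro n
  induction n using Nat.strong_induction_on with
  | _ n IH =>
    intro hn h0
    rcases Nat.even_or_odd n with he | ho
    · obtain ⟨m, hm⟩ := he
      have hm2 : n = 2 * m := by omega
      have hmne : m ≠ 0 := by omega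
      have key : m &&& (m - 1) = 0 := by
        apply Nat.eq_of_testBit_eq
        intro i
        have hbit := congrArg (fun x => x.testBit (i + 1)) h0
        simp only [Nat.zero_testBit] at hbit ⊢
        rw [Nat.testBit_and, Nat.testBit_succ, Nat.testBit_succ,
          show n / 2 = m by omega, show (n - 1) / 2 = m - 1 by omega] at hbit
        rw [Nat.testBit_and]
        exact hbit
      obtain ⟨k, hk⟩ := IH m (by omega) hmne key
      exact ⟨k + 1, by rw [hm2, hk, pow_succ]; ring⟩
    · obtain ⟨m, hm⟩ := ho
      by_cases hm0 : m = 0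
      · exact ⟨0, by omega⟩
      · exfalso
        obtain ⟨i, hi⟩ := Nat.exists_testBit_of_ne_zero hm0
        have hbit := congrArg (fun x => x.testBit (i + 1)) h0
        simp only [Nat.zero_testBit] at hbit
        rw [Nat.testBit_and, Nat.testBit_succ, Nat.testBit_succ,
          show n / 2 = m by omega, show (n - 1) / 2 = m by omega, hi] at hbit
        simp at hbit

theorem pow2_land_pred (k : Nat) : 2 ^ k &&& (2 ^ k - 1) = 0 := by
  apply Nat.eq_of_testBit_eq
  intro i
  rw [Nat.testBit_and, Nat.testBit_two_pow, Nat.testBit_two_pow_sub_one, Nat.zero_testBit]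
  by_cases h : k = i
  · simp [h]
  · simp [h]

-- B's per-cell predicate ↔ the diagonal-or-butterfly characterisation of A's entries
theorem cell_iff (big : Int) (a b : Nat) :
    (PySem.Int.bxor (↑a) (↑b) = 0 ∨
      (PySem.Int.band (PySem.Int.bxor (↑a) (↑b)) (PySem.Int.bxor (↑a) (↑b) - 1) = 0 ∧
        PySem.Int.bxor (↑a) (↑b) < big))
    ↔ (a = b ∨ ∃ k : Nat, (b : Int) = PySem.Int.bxor (↑a) (2 ^ k) ∧ (2 : Int) ^ k < big) := by
  rw [PySem.Int.bxor_natCast]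
  by_cases hab : a = b
  · subst hab
    simp
  · have hvne : a ^^^ b ≠ 0 := fun h => hab (Nat.xor_eq_zero_iff.mp h)
    have hv1 : 1 ≤ a ^^^ b := Nat.one_le_iff_ne_zero.mpr hvne
    have hcast : ((a ^^^ b : Nat) : Int) - 1 = (((a ^^^ b) - 1 : Nat) : Int) := by omega
    constructor
    · rintro (h | ⟨h1, h2⟩)
      · exact absurd (by exact_mod_cast h) hvne
      · rw [hcast, PySem.Int.band_natCast] at h1
        have h1' : (a ^^^ b) &&& ((a ^^^ b) - 1) = 0 := by exact_mod_cast h1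
        obtain ⟨k, hk⟩ := land_pred_pow2 _ hvne h1'
        refine Or.inr ⟨k, ?_, ?_⟩
        · rw [show ((2 : Int) ^ k) = ((2 ^ k : Nat) : Int) by push_cast; ring,
            PySem.Int.bxor_natCast, ← hk]
          have : a ^^^ (a ^^^ b) = b := by
            rw [← Nat.xor_assoc, Nat.xor_self, Nat.zero_xor]
          rw [this]
        · calc (2 : Int) ^ k = ((a ^^^ b : Nat) : Int) := by rw [hk]; push_cast; ring
            _ < big := h2
    · rintro (h | ⟨k, hk1, hk2⟩)
      · exact absurd h hab
      · rw [show ((2 : Int) ^ k) = ((2 ^ k : Nat) : Int) by push_cast; ring,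
          PySem.Int.bxor_natCast] at hk1
        have hb' : b = a ^^^ 2 ^ k := by exact_mod_cast hk1
        have hv : a ^^^ b = 2 ^ k := by
          rw [hb', ← Nat.xor_assoc, Nat.xor_self, Nat.zero_xor]
        refine Or.inr ⟨?_, ?_⟩
        · rw [hcast, PySem.Int.band_natCast, hv, pow2_land_pred]
          rfl
        · rw [hv]; push_cast at hk2 ⊢; linarith

-- the master equivalence, for arbitrary tile counts Tr Tc
theorem mask_eq (Tr Tc : Int) :
    strideLoop Tr Tc
      ((PySem.List.pyRange 0 (min Tr Tc) 1).foldl (fun m i => setCell m i i)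
        (List.replicate Tr.toNat (List.replicate Tc.toNat (0 : Int)))) 1
    = (PySem.List.pyRange 0 Tr 1).map
        (fun i => (PySem.List.pyRange 0 Tc 1).map (pvCell (max Tr Tc) i)) := by
  have hm0 : Shaped (List.replicate Tr.toNat (List.replicate Tc.toNat (0 : Int)))
      Tr.toNat Tc.toNat :=
    ⟨List.length_replicate, fun r hr => by
      rw [List.eq_of_mem_replicate hr]; exact List.length_replicate⟩
  obtain ⟨hm1, he1⟩ := entry_diagFold (PySem.List.pyRange 0 (min Tr Tc) 1) _ _ _ hm0
    (fun x hx => by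
      rw [PySem.List.mem_pyRange_one] at hx
      exact ⟨hx.1, by omega, by omega⟩)
  obtain ⟨hm2, he2⟩ := strideLoop_props Tr Tc (max Tr Tc - 1).toNat 1 _ rfl one_pos hm1
  apply List.ext_getElem
  · rw [hm2.1, List.length_map, PySem.List.length_pyRange_one]
    omega
  · intro a h1 h2
    have haR : a < Tr.toNat := by rw [hm2.1] at h1; exact h1
    have hrowA : ((strideLoop Tr Tc
        ((PySem.List.pyRange 0 (min Tr Tc) 1).foldl (fun m i => setCell m i i)
          (List.replicate Tr.toNat (List.replicate Tc.toNat (0 : Int)))) 1)[a]'h1).length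
        = Tc.toNat := hm2.2 _ (List.getElem_mem h1)
    have hgetR : ((PySem.List.pyRange 0 Tr 1).map
          (fun i => (PySem.List.pyRange 0 Tc 1).map (pvCell (max Tr Tc) i)))[a]'h2
        = (PySem.List.pyRange 0 Tc 1).map (pvCell (max Tr Tc) ((a : Nat) : Int)) := by
      rw [List.getElem_map, PySem.List.getElem_pyRange_one]
      norm_num
    apply List.ext_getElem
    · rw [hrowA, hgetR, List.length_map, PySem.List.length_pyRange_one]
      omega
    · intro b hb1 hb2
      have hbC : b < Tc.toNat := by rw [hrowA] at hb1; exact hb1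
      rw [getElem_eq_entry _ _ _ h1 hb1]
      have hRside : (((PySem.List.pyRange 0 Tr 1).map
          (fun i => (PySem.List.pyRange 0 Tc 1).map (pvCell (max Tr Tc) i)))[a]'h2)[b]'hb2
          = pvCell (max Tr Tc) ((a : Nat) : Int) ((b : Nat) : Int) := by
        simp only [List.getElem_map, PySem.List.getElem_pyRange_one]
        norm_num
      rw [hRside]
      have hdiag : (((a : Nat) : Int) ∈ PySem.List.pyRange 0 (min Tr Tc) 1 ∧ a = b) ↔ a = b := by
        constructor
        · exact fun h => h.2
        · intro h
          refine ⟨?_, h⟩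
          rw [PySem.List.mem_pyRange_one]
          omega
      by_cases hex : ∃ k : Nat, ((b : Nat) : Int) = PySem.Int.bxor (↑a) (2 ^ k)
          ∧ (2 : Int) ^ k < max Tr Tc
      · have hex' : ∃ k : Nat, ((b : Nat) : Int) = PySem.Int.bxor (↑a) (1 * 2 ^ k)
            ∧ 1 * 2 ^ k < max Tr Tc := by
          obtain ⟨k, hk1, hk2⟩ := hex
          exact ⟨k, by simpa using hk1, by simpa using hk2⟩
        rw [(he2 a b haR hbC).1 hex']
        unfold pvCell
        rw [if_pos ((cell_iff (max Tr Tc) a b).mpr (Or.inr hex))]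
      · have hex' : ¬∃ k : Nat, ((b : Nat) : Int) = PySem.Int.bxor (↑a) (1 * 2 ^ k)
            ∧ 1 * 2 ^ k < max Tr Tc := by
          rintro ⟨k, hk1, hk2⟩
          exact hex ⟨k, by simpa using hk1, by simpa using hk2⟩
        rw [(he2 a b haR hbC).2 hex', he1 a b, entry_replicate]
        by_cases hd : a = b
        · rw [if_pos (hdiag.mpr hd)]
          unfold pvCell
          rw [if_pos ((cell_iff (max Tr Tc) a b).mpr (Or.inl hd))]
        · rw [if_neg (fun hc => hd (hdiag.mp hc))]
          unfold pvCell
          rw [if_neg (fun hc => by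
            rcases (cell_iff (max Tr Tc) a b).mp hc with h | h
            · exact hd h
            · exact hex h)]

-- ===== VERDICT (by name: the statement is the Claim_ definition above) =====
theorem butterfly_mask_spec : Claim_equal_butterfly_mask := by
  intro N Br Bc _ _
  unfold Spec_butterfly_mask butterfly_mask butterfly_mask_alt
  exact mask_eq (pyCeil N Br) (pyCeil N Bc)
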